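-- pv_equiv track=rewrite | github.com/carlosdenner/governance-readiness | data/astalabs_experiments_session2/EXP_229_node_6_45/code.py | parse_control
-- ===== SOURCE A (Python) =====
-- def parse_control(text, positive_keywords, negative_keywords):
--     if not isinstance(text, str):
--         return 0
--     text_lower = text.lower()
--     # Check negative first
--     for kw in negative_keywords:
--         if kw in text_lower:
--             return 0
--     # Check positive
--     for kw in positive_keywords:
--         if kw in text_lower:
--             return 1
--     return 0
-- ===== SOURCE B (Python) =====
-- def parse_control(text, positive_keywords, negative_keywords):
--     if not isinstance(text, str):
--         return 0
--     t = text.lower()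
--     # n-gram index: collect every substring of t whose length is a keyword length,
--     # then each keyword test is a single set lookup
--     lengths = {len(k) for k in negative_keywords + positive_keywords}
--     grams = {t[i:i + n] for n in lengths for i in range(len(t) - n + 1)}
--     if any(k in grams for k in negative_keywords):
--         return 0
--     return 1 if any(k in grams for k in positive_keywords) else 0
-- ===== Notes on version B (the rewrite author's own statement) =====
-- stated objective: alternative
-- what changed: B indexes the lowered text once into a set of all its substrings of the keyword lengths (an n-gram index) and then answers each keyword by a single set lookup, instead of A's separate substring search over the text per keyword.
import Mathlib
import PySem

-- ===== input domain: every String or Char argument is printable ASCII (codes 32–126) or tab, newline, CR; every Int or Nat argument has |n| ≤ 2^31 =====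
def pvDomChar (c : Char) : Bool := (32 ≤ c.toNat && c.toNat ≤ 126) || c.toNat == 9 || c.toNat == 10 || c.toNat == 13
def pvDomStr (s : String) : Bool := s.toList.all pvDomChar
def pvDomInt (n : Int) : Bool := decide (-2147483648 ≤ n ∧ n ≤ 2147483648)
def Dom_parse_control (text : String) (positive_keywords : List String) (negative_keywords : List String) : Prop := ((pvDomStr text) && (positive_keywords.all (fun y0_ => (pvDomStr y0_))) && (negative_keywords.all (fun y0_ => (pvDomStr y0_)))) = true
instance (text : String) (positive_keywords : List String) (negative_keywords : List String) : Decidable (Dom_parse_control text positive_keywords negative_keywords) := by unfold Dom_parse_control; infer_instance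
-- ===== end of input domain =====

-- B builds an n-gram index of the lowered text once (every substring whose length is a
-- keyword length, as a set) and tests each keyword by one set lookup, instead of A's
-- per-keyword substring search; objective: alternative algorithm.

-- ===== PORT A =====
-- 'for kw in kws: if kw in t: return <hit>' — first loop (negatives), then second (positives)
def aAnyIn (kws : List String) (t : String) : Bool :=
  match kws with
  | [] => false
  | kw :: rest => if PySem.Str.isIn kw t then true else aAnyIn rest t

def parse_control (text : String) (positive_keywords : List String) (negative_keywords : List String) : Int :=
  -- 'if not isinstance(text, str): return 0' is vacuous here: text is always a str
  let text_lower := PySem.Str.lower text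
  if aAnyIn negative_keywords text_lower then 0
  else if aAnyIn positive_keywords text_lower then 1
  else 0

-- ===== PORT B =====
-- 'lengths = {len(k) for k in negative_keywords + positive_keywords}'
def bLengths (negative_keywords positive_keywords : List String) : PySem.Set Int :=
  PySem.Set.ofList ((negative_keywords ++ positive_keywords).map (fun k => (k.toList.length : Int)))

-- 'grams = {t[i:i + n] for n in lengths for i in range(len(t) - n + 1)}'
def bGrams (t : List Char) (lens : List Int) : PySem.Set (List Char) :=
  lens.foldl (fun g n =>
    (PySem.List.pyRange 0 ((t.length : Int) - n + 1)).foldl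
      (fun g i => PySem.Set.add g (PySem.List.slice t (some i) (some (i + n)))) g)
    PySem.Set.empty

-- 'any(k in grams for k in kws)'
def bAnyMem (kws : List String) (grams : PySem.Set (List Char)) : Bool :=
  kws.any (fun k => PySem.Set.contains grams k.toList)

def parse_control_alt (text : String) (positive_keywords : List String) (negative_keywords : List String) : Int :=
  let t := (PySem.Str.lower text).toList
  let lens := bLengths negative_keywords positive_keywords
  let grams := bGrams t lens
  if bAnyMem negative_keywords grams then 0
  else if bAnyMem positive_keywords grams then 1
  else 0

-- ===== PRECONDITION & SPEC =====
def Spec_parse_control (text : String) (positive_keywords : List String) (negative_keywords : List String) (out : Int) : Prop := out = parse_control_alt text positive_keywords negative_keywords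
instance (text : String) (positive_keywords : List String) (negative_keywords : List String) (out : Int) : Decidable (Spec_parse_control text positive_keywords negative_keywords out) := by unfold Spec_parse_control; infer_instance

-- ===== CLAIM (what is proved, stated in full; the proofs are below) =====
def Claim_equal_parse_control : Prop := ∀ (text : String) (positive_keywords : List String) (negative_keywords : List String), Dom_parse_control text positive_keywords negative_keywords → Spec_parse_control text positive_keywords negative_keywords (parse_control text positive_keywords negative_keywords)

-- ===== LEMMAS AND PROOFS =====

theorem aAnyIn_eq_any (kws : List String) (t : String) :
    aAnyIn kws t = kws.any (fun kw => PySem.Str.isIn kw t) := by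
  induction kws with
  | nil => rfl
  | cons kw rest ih => simp [aAnyIn, ih]

-- membership in the inner comprehension over one length n
theorem mem_inner_foldl (t : List Char) (n : Int) (g : PySem.Set (List Char)) (s : List Char) :
    s ∈ (PySem.List.pyRange 0 ((t.length : Int) - n + 1)).foldl
          (fun g i => PySem.Set.add g (PySem.List.slice t (some i) (some (i + n)))) g ↔
      s ∈ g ∨ ∃ i : Int, 0 ≤ i ∧ i ≤ (t.length : Int) - n ∧
        PySem.List.slice t (some i) (some (i + n)) = s := by
  rw [← PySem.Set.update_map_eq_foldl_add, PySem.Set.mem_update]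
  simp [and_assoc]

theorem mem_bGrams_aux (t : List Char) (lens : List Int) (g : PySem.Set (List Char)) (s : List Char) :
    s ∈ lens.foldl (fun g n =>
          (PySem.List.pyRange 0 ((t.length : Int) - n + 1)).foldl
            (fun g i => PySem.Set.add g (PySem.List.slice t (some i) (some (i + n)))) g) g ↔
      s ∈ g ∨ ∃ n ∈ lens, ∃ i : Int, 0 ≤ i ∧ i ≤ (t.length : Int) - n ∧
        PySem.List.slice t (some i) (some (i + n)) = s := by
  induction lens generalizing g with
  | nil => simp
  | cons n rest ih =>
    simp only [List.foldl_cons, ih, mem_inner_foldl, List.mem_cons]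
    constructor
    · rintro ((h | ⟨i, hi⟩) | ⟨m, hm, h⟩)
      · exact Or.inl h
      · exact Or.inr ⟨n, Or.inl rfl, i, hi⟩
      · exact Or.inr ⟨m, Or.inr hm, h⟩
    · rintro (h | ⟨m, (rfl | hm), h⟩)
      · exact Or.inl (Or.inl h)
      · exact Or.inl (Or.inr h)
      · exact Or.inr ⟨m, hm, h⟩

theorem mem_bGrams (t : List Char) (lens : List Int) (s : List Char) :
    s ∈ bGrams t lens ↔
      ∃ n ∈ lens, ∃ i : Int, 0 ≤ i ∧ i ≤ (t.length : Int) - n ∧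
        PySem.List.slice t (some i) (some (i + n)) = s := by
  unfold bGrams
  rw [mem_bGrams_aux]
  simp [PySem.Set.empty]

-- a keyword of a length appearing in lens is in the gram set iff it is an infix of t
theorem gram_iff_infix (t kw : List Char) (lens : List Int) (hmem : (kw.length : Int) ∈ lens)
    (hnn : ∀ n ∈ lens, 0 ≤ n) :
    kw ∈ bGrams t lens ↔ kw <:+: t := by
  rw [mem_bGrams]
  constructor
  · rintro ⟨n, hn, i, hi0, hile, hsl⟩
    rw [PySem.List.slice_toNat _ hi0 (by have := hnn n hn; omega)] at hsl
    rw [← hsl]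
    have h1 : (List.take ((i + n).toNat - i.toNat) (List.drop i.toNat t)) <+: List.drop i.toNat t :=
      List.take_prefix _ _
    exact h1.isInfix.trans (List.drop_suffix _ _).isInfix
  · rintro ⟨pre, post, h⟩
    refine ⟨(kw.length : Int), hmem, (pre.length : Int), by positivity, ?_, ?_⟩
    · have : pre.length + kw.length ≤ t.length := by rw [← h]; simp
      omega
    · rw [PySem.List.slice_toNat _ (by positivity) (by positivity), ← h]
      simp [show (((pre.length : Int)) + (kw.length : Int)).toNat = pre.length + kw.length
              from by omega]

theorem bAnyMem_eq (t : List Char) (kws : List String) (lens : List Int)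
    (hmem : ∀ kw ∈ kws, ((kw.toList.length : Int)) ∈ lens)
    (hnn : ∀ n ∈ lens, 0 ≤ n) :
    bAnyMem kws (bGrams t lens) = kws.any (fun kw => PySem.Chars.isIn kw.toList t) := by
  unfold bAnyMem
  rw [Bool.eq_iff_iff]
  simp only [List.any_eq_true]
  constructor <;> rintro ⟨kw, hkw, h⟩ <;> refine ⟨kw, hkw, ?_⟩
  · rw [PySem.Set.contains_iff, gram_iff_infix t _ lens (hmem kw hkw) hnn] at h
    exact (PySem.Chars.isIn_iff_infix _ _).mpr h
  · rw [PySem.Set.contains_iff, gram_iff_infix t _ lens (hmem kw hkw) hnn]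
    exact (PySem.Chars.isIn_iff_infix _ _).mp h

theorem isIn_str_chars (kw t : String) :
    PySem.Str.isIn kw t = PySem.Chars.isIn kw.toList t.toList := by
  rw [Bool.eq_iff_iff, PySem.Str.isIn_iff_infix, PySem.Chars.isIn_iff_infix]

theorem lengths_mem (neg pos : List String) (kw : String) (h : kw ∈ neg ++ pos) :
    ((kw.toList.length : Int)) ∈ bLengths neg pos := by
  unfold bLengths
  rw [PySem.Set.mem_ofList]
  exact List.mem_map_of_mem h

theorem lengths_nonneg (neg pos : List String) : ∀ n ∈ bLengths neg pos, 0 ≤ n := by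
  intro n hn
  unfold bLengths at hn
  rw [PySem.Set.mem_ofList] at hn
  obtain ⟨kw, _, rfl⟩ := List.mem_map.mp hn
  positivity

-- ===== VERDICT (by name: the statement is the Claim_ definition above) =====
theorem parse_control_spec : Claim_equal_parse_control := by
  intro text pos neg _
  unfold Spec_parse_control parse_control parse_control_alt
  simp only []
  rw [bAnyMem_eq _ _ _ (fun kw h => lengths_mem neg pos kw (List.mem_append_left _ h))
        (lengths_nonneg neg pos),
      bAnyMem_eq _ _ _ (fun kw h => lengths_mem neg pos kw (List.mem_append_right _ h))
        (lengths_nonneg neg pos)]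
  simp only [aAnyIn_eq_any, isIn_str_chars]
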